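-- pv_equiv track=rewrite | github.com/hericlesme/ATG | Prática 2/grafos3.py | criaArestas
-- ===== SOURCE A (Python) =====
-- def criaArestas(grafo):
-- 	arestas = []
-- 	for i in grafo:
-- 		for e in grafo[i]:
-- 			if i+e not in arestas:
-- 				arestas.append(i+e)
-- 			if e+i not in arestas:
-- 				arestas.append(e+i)
-- 	return arestas
-- ===== SOURCE B (Python) =====
-- def criaArestas(grafo):
--     candidatos = [s for i in grafo for e in grafo[i] for s in (i + e, e + i)]
--     arestas = []
--     while candidatos:
--         c = candidatos[0]
--         arestas.append(c)
--         candidatos = [y for y in candidatos[1:] if y != c]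
--     return arestas
-- ===== Notes on version B (the rewrite author's own statement) =====
-- stated objective: alternative
-- what changed: A's single branch-laden pass testing each candidate against the growing output is replaced by an unconditional generate phase followed by a selection loop that repeatedly takes the head and filters all its later duplicates out of the remaining candidate stream (nub by filtering the input, no membership test against the output and no seen-set).
import Mathlib
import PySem

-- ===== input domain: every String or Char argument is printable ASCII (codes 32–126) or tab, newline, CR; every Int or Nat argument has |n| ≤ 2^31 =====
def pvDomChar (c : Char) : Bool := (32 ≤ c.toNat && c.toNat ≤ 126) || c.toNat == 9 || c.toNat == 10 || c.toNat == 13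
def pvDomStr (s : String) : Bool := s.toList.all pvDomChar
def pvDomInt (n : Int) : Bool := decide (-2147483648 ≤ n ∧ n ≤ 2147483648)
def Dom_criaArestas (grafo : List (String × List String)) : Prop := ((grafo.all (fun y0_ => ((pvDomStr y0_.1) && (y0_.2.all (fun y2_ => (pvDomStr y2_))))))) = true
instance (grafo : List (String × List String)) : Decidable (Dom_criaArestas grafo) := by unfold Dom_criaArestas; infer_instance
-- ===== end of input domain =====

-- B replaces A's single pass with membership tests against the growing output by an
-- unconditional generate phase plus a head-select/filter (nub) loop over the remaining
-- candidates; alternative decomposition, same return value.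

-- ===== PORT A =====
def criaArestas (grafo : List (String × List String)) : List String :=
  grafo.foldl (fun arestas p =>
    p.2.foldl (fun arestas e =>
      let arestas := if (p.1 ++ e) ∈ arestas then arestas else arestas ++ [p.1 ++ e]
      if (e ++ p.1) ∈ arestas then arestas else arestas ++ [e ++ p.1]) arestas) []

-- ===== PORT B =====
-- the while loop of Source B: take the head, append it to the output, filter it out of the rest.
-- fuel = initial length of candidatos, a pure totality guard (the filtered rest is never longer).
def pvNubLoop (fuel : Nat) (candidatos : List String) (arestas : List String) : List String :=
  match fuel, candidatos with
  | _, [] => arestas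
  | 0, _ => arestas
  | f + 1, c :: tl => pvNubLoop f (tl.filter (fun y => y ≠ c)) (arestas ++ [c])

def criaArestas_alt (grafo : List (String × List String)) : List String :=
  let candidatos := grafo.flatMap (fun p => p.2.flatMap (fun e => [p.1 ++ e, e ++ p.1]))
  pvNubLoop candidatos.length candidatos []

-- ===== PRECONDITION & SPEC =====
def Spec_criaArestas (grafo : List (String × List String)) (out : List String) : Prop := out = criaArestas_alt grafo
instance (grafo : List (String × List String)) (out : List String) : Decidable (Spec_criaArestas grafo out) := by unfold Spec_criaArestas; infer_instance

-- ===== CLAIM =====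
def Claim_equal_criaArestas : Prop := ∀ (grafo : List (String × List String)), Dom_criaArestas grafo → Spec_criaArestas grafo (criaArestas grafo)

-- ===== LEMMAS AND PROOFS =====

-- accumulator-free form of the nub loop
def pvNubPure (fuel : Nat) (xs : List String) : List String :=
  match fuel, xs with
  | _, [] => []
  | 0, _ => []
  | f + 1, c :: tl => c :: pvNubPure f (tl.filter (fun y => y ≠ c))

theorem pvNubLoop_eq : ∀ (f : Nat) (xs : List String), xs.length ≤ f →
    ∀ out, pvNubLoop f xs out = out ++ pvNubPure f xs := by
  intro f
  induction f with
  | zero => intro xs h out; cases xs with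
      | nil => simp [pvNubLoop, pvNubPure]
      | cons c tl => simp at h
  | succ f ih =>
      intro xs h out
      cases xs with
      | nil => simp [pvNubLoop, pvNubPure]
      | cons c tl =>
          simp only [pvNubLoop, pvNubPure]
          rw [ih _ (le_trans (List.length_filter_le _ _) (by simpa using h))]
          simp

theorem pvNubPure_fuel : ∀ (f g : Nat) (xs : List String), xs.length ≤ f → xs.length ≤ g →
    pvNubPure f xs = pvNubPure g xs := by
  intro f
  induction f with
  | zero => intro g xs h _; cases xs with
      | nil => cases g <;> simp [pvNubPure]
      | cons c tl => simp at h
  | succ f ih =>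
      intro g xs hf hg
      cases xs with
      | nil => cases g <;> simp [pvNubPure]
      | cons c tl =>
          cases g with
          | zero => simp at hg
          | succ g =>
              simp only [pvNubPure]
              exact congrArg _ (ih g _
                (le_trans (List.length_filter_le _ _) (by simpa using hf))
                (le_trans (List.length_filter_le _ _) (by simpa using hg)))

theorem foldl_add_eq_nub : ∀ (f : Nat) (xs : List String), xs.length ≤ f → ∀ acc : List String,
    xs.foldl (fun s x => if x ∈ s then s else s ++ [x]) acc
      = acc ++ pvNubPure f (xs.filter (fun y => y ∉ acc)) := by
  intro f
  induction f with
  | zero => intro xs h acc; cases xs with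
      | nil => simp [pvNubPure]
      | cons c tl => simp at h
  | succ f ih =>
      intro xs h acc
      cases xs with
      | nil => simp [pvNubPure]
      | cons c tl =>
          have htl : tl.length ≤ f := by simpa using h
          by_cases hc : c ∈ acc
          · have hfil : (c :: tl).filter (fun y => decide (y ∉ acc))
                = tl.filter (fun y => decide (y ∉ acc)) := by
              simp [hc]
            simp only [List.foldl_cons, if_pos hc]
            rw [hfil, ih tl htl acc]
            exact congrArg _ (pvNubPure_fuel f (f + 1) _
              (le_trans (List.length_filter_le _ _) htl)
              (le_trans (List.length_filter_le _ _) (Nat.le_succ_of_le htl)))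
          · simp only [List.foldl_cons, if_neg hc, List.filter_cons]
            simp only [hc, decide_not, decide_false, Bool.not_false, if_true]
            rw [ih tl htl (acc ++ [c])]
            simp only [pvNubPure, List.append_assoc, List.singleton_append]
            congr 2
            rw [List.filter_filter]
            have hfe : List.filter (fun y => decide (y ∉ acc ++ [c])) tl
                = List.filter (fun a => decide (a ≠ c) && !decide (a ∈ acc)) tl := by
              apply List.filter_congr
              intro y _
              by_cases hy : y = c <;> by_cases hya : y ∈ acc <;>
                simp [hy, hya]
            rw [hfe]

theorem criaArestas_eq_foldl_add (grafo : List (String × List String)) :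
    criaArestas grafo
      = (grafo.flatMap (fun p => p.2.flatMap (fun e => [p.1 ++ e, e ++ p.1]))).foldl
          (fun s x => if x ∈ s then s else s ++ [x]) [] := by
  unfold criaArestas
  rw [List.foldl_flatMap]
  apply PySem.List.foldl_congr_mem
  intro acc p _
  rw [List.foldl_flatMap]
  apply PySem.List.foldl_congr_mem
  intro acc e _
  simp [List.foldl]

-- ===== VERDICT =====
theorem criaArestas_spec : Claim_equal_criaArestas := by
  intro grafo _
  unfold Spec_criaArestas criaArestas_alt
  rw [criaArestas_eq_foldl_add]
  rw [foldl_add_eq_nub _ _ (le_refl _) []]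
  rw [pvNubLoop_eq _ _ (le_refl _)]
  simp
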